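-- pv_equiv track=rewrite | github.com/qualya/password-manager | main.py | wordsToHex
-- ===== SOURCE A (Python) =====
-- def wordsToHex(wordsKey, wordsList):
--     digits = list() #converts the mnemonic into a list of digits in base 2048
--     for word in wordsKey: #loops through the words in the mnemonic
--         digits.append(wordsList.index(word)) #adds the position of the word of the mnemonic in the list of words
--     digits.reverse()
--
--     hexKey = 0
--     for i in range(len(digits)): #loops through all of the base 2048 digits
--         hexKey += digits[i]*2048**i #adds each of the digits in the base 2048 number multiplied by 2048 to the power of the digit's position to the previous number (the private key)
--     hexKey = str(hex(hexKey))[2:] #converts the base 10 private key converted above into hexadecimal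
--
--     return hexKey
-- ===== SOURCE B (Python) =====
-- def wordsToHex(wordsKey, wordsList):
--     pos = {}
--     for i, word in enumerate(wordsList):
--         pos.setdefault(word, i)  # first occurrence, matching list.index
--     hexKey = 0
--     for word in wordsKey:  # Horner: one pass, no digits list, no reverse, no powers
--         hexKey = hexKey * 2048 + pos[word]
--     return format(hexKey, 'x')
-- ===== Notes on version B (the rewrite author's own statement) =====
-- stated objective: faster
-- what changed: Builds a word->position hash index once (setdefault keeps the first occurrence, like list.index) and evaluates the base-2048 number in a single Horner pass, instead of A's three stages (inner-scan index per word into a digits list, reverse, positional power sum with recomputed 2048**i).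
import Mathlib
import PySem

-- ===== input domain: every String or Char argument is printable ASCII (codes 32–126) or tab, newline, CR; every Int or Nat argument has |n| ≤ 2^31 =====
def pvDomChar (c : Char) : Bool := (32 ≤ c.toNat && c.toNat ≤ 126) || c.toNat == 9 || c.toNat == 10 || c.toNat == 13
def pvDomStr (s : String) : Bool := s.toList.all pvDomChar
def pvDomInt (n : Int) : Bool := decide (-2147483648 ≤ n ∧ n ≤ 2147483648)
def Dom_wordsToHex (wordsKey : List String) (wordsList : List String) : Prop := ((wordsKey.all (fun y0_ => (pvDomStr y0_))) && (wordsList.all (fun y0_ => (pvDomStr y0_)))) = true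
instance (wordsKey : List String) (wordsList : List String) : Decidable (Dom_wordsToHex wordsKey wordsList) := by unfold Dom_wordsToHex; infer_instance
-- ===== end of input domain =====

-- B builds a word→position dict once (setdefault keeps the first occurrence, like list.index) and
-- evaluates the base-2048 number by one Horner pass, replacing A's digits-list/reverse/power-sum stages.
-- On a word missing from wordsList both raise (A ValueError, B KeyError); Pre_ excludes exactly those inputs.

-- ===== PORT A =====
-- hex(n)[2:] for n >= 0 (Python lowercase hex, hex(0)='0x0' -> '0'); hand-written, exact for nonnegative n
def hexDigitChar (n : Nat) : Char := if n < 10 then Char.ofNat (48 + n) else Char.ofNat (87 + n)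

def natToHexAux : Nat → List Char → List Char
  | 0, acc => acc
  | Nat.succ m, acc => natToHexAux ((Nat.succ m) / 16) (hexDigitChar ((Nat.succ m) % 16) :: acc)
decreasing_by exact Nat.div_lt_self (Nat.succ_pos m) (by omega)

def natToHexStr (n : Nat) : String := if n = 0 then "0" else String.ofList (natToHexAux n [])

-- wordsList.index(word) raises ValueError on a missing word: index? returns none there; Pre_ excludes exactly those inputs, .getD 0 is never taken under Pre_
def wordsToHex (wordsKey : List String) (wordsList : List String) : String :=
  let digits : List Nat := wordsKey.foldl (fun acc word => acc ++ [(PySem.List.index? wordsList word).getD 0]) []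
  let digits := digits.reverse
  let hexKey : Nat := (PySem.List.pyRange 0 digits.length 1).foldl
      (fun h i => h + (PySem.List.pyGetD digits i 0) * 2048 ^ i.toNat) 0
  natToHexStr hexKey

-- ===== PORT B =====
-- format(n, 'x') for n >= 0, hand-written top-down (exact for nonnegative n)
def hexTable (n : Nat) : Char := ("0123456789abcdef".toList).getD n '0'

def hexChars (n : Nat) : List Char :=
  if _h : n < 16 then [hexTable n]
  else hexChars (n / 16) ++ [hexTable (n % 16)]
decreasing_by exact Nat.div_lt_self (by omega) (by omega)

-- pos[word] raises KeyError on a missing word: get? is none there; excluded by Pre_, .getD 0 never taken under Pre_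
def wordsToHex_alt (wordsKey : List String) (wordsList : List String) : String :=
  let pos : PySem.Dict String Int :=
    (PySem.List.enumerate wordsList).foldl (fun d p => PySem.Dict.setdefault d p.2 p.1) PySem.Dict.empty
  let hexKey : Int := wordsKey.foldl (fun h word => h * 2048 + (pos.get? word).getD 0) 0
  String.ofList (hexChars hexKey.toNat)

-- ===== PRECONDITION & SPEC =====
-- Pre_ excludes exactly the inputs on which A raises ValueError (a word of wordsKey absent from wordsList; B raises KeyError there)
def Pre_wordsToHex (wordsKey : List String) (wordsList : List String) : Prop :=
  ∀ w ∈ wordsKey, w ∈ wordsList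
instance (wordsKey : List String) (wordsList : List String) : Decidable (Pre_wordsToHex wordsKey wordsList) := by unfold Pre_wordsToHex; infer_instance
def pvWitness_wordsToHex : List String × List String := (["cd", "ab"], ["ab", "cd", "ef"])

def Spec_wordsToHex (wordsKey : List String) (wordsList : List String) (out : String) : Prop := out = wordsToHex_alt wordsKey wordsList
instance (wordsKey : List String) (wordsList : List String) (out : String) : Decidable (Spec_wordsToHex wordsKey wordsList out) := by unfold Spec_wordsToHex; infer_instance

-- ===== CLAIM (what is proved, stated in full; the proofs are below) =====
def Claim_equal_wordsToHex : Prop := ∀ (wordsKey : List String) (wordsList : List String), Dom_wordsToHex wordsKey wordsList → Pre_wordsToHex wordsKey wordsList → Spec_wordsToHex wordsKey wordsList (wordsToHex wordsKey wordsList)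

-- ===== LEMMAS AND PROOFS =====

-- the two hex tables agree on the 16 digits
theorem hexTable_eq_hexDigitChar (n : Nat) (h : n < 16) : hexTable n = hexDigitChar n := by
  interval_cases n <;> rfl

-- A's accumulator hex loop = B's top-down hex recursion
theorem natToHexAux_eq_hexChars (n : Nat) (acc : List Char) (hn : n ≠ 0) :
    natToHexAux n acc = hexChars n ++ acc := by
  induction n using Nat.strong_induction_on generalizing acc with
  | _ n ih =>
    obtain ⟨m, rfl⟩ := Nat.exists_eq_succ_of_ne_zero hn
    rw [natToHexAux]
    by_cases h16 : Nat.succ m < 16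
    · have hdiv : Nat.succ m / 16 = 0 := Nat.div_eq_of_lt h16
      have hmod : Nat.succ m % 16 = Nat.succ m := Nat.mod_eq_of_lt h16
      rw [hdiv, hmod, natToHexAux, hexChars]
      simp [h16, hexTable_eq_hexDigitChar _ h16]
    · have hdne : Nat.succ m / 16 ≠ 0 :=
        Nat.ne_of_gt (Nat.div_pos (by omega) (by omega))
      rw [ih (Nat.succ m / 16) (Nat.div_lt_self (Nat.succ_pos m) (by omega)) _ hdne]
      conv_rhs => rw [hexChars]
      rw [dif_neg h16, hexTable_eq_hexDigitChar _ (Nat.mod_lt _ (by omega)), List.append_assoc]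
      rfl

theorem natToHexStr_eq (n : Nat) : natToHexStr n = String.ofList (hexChars n) := by
  unfold natToHexStr
  by_cases h : n = 0
  · subst h
    rw [if_pos rfl, hexChars, dif_pos (by omega : (0:Nat) < 16)]
    rfl
  · rw [if_neg h, natToHexAux_eq_hexChars n [] h, List.append_nil]

-- the setdefault loop over enumerate builds first-occurrence positions = index?
theorem get?_setdefault_enumerate (ws : List String) (s : Int) (d : PySem.Dict String Int) (w : String) :
    ((PySem.List.enumerate ws s).foldl (fun d p => PySem.Dict.setdefault d p.2 p.1) d).get? w
      = ((d.get? w).orElse (fun _ => (PySem.List.index? ws w).map (fun k => (k : Int) + s))) := by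
  induction ws generalizing s d with
  | nil => cases hg : d.get? w <;> simp [PySem.List.enumerate_nil, Option.orElse, hg]
  | cons x t ih =>
    rw [PySem.List.enumerate_cons, List.foldl_cons, ih]
    by_cases hw : w = x
    · subst hw
      rw [PySem.List.index?_cons_self]
      by_cases hc : d.contains w = true
      · have hsd : d.setdefault w s = d := by
          unfold PySem.Dict.setdefault; rw [if_pos hc]
        have hsome : (d.get? w).isSome := by
          rw [← PySem.Dict.contains_eq_isSome_get?]; exact hc
        obtain ⟨v, hv⟩ := Option.isSome_iff_exists.mp hsome
        rw [hsd]
        simp [hv, Option.orElse]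
      · have hg : d.get? w = none := by
          cases hg : d.get? w with
          | none => rfl
          | some v =>
            exfalso
            exact hc (by rw [PySem.Dict.contains_eq_isSome_get?, hg]; rfl)
        have hcf : d.contains w = false := by
          cases hcc : d.contains w with
          | false => rfl
          | true => exact absurd hcc hc
        have hsd : d.setdefault w s = d.insert w s := by
          apply PySem.Dict.ext
          unfold PySem.Dict.setdefault
          rw [if_neg hc, PySem.Dict.items_insert_of_not_contains d s hcf]
        rw [hsd, PySem.Dict.get?_insert_self, hg]
        simp [Option.orElse]
    · have hstep : (d.setdefault x s).get? w = d.get? w := by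
        by_cases hc : d.contains x = true
        · unfold PySem.Dict.setdefault; rw [if_pos hc]
        · have hcf : d.contains x = false := by
            cases hcc : d.contains x with
            | false => rfl
            | true => exact absurd hcc hc
          have hsd : d.setdefault x s = d.insert x s := by
            apply PySem.Dict.ext
            unfold PySem.Dict.setdefault
            rw [if_neg hc, PySem.Dict.items_insert_of_not_contains d s hcf]
          rw [hsd]
          exact PySem.Dict.get?_insert_of_ne d s hw
      rw [hstep, PySem.List.index?_cons_of_ne t (Ne.symm hw)]
      cases hg : d.get? w with
      | some v => simp [Option.orElse]
      | none =>
        simp only [Option.orElse]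
        cases hk : PySem.List.index? t w with
        | none => simp
        | some k =>
          simp only [Option.map_some]
          refine congrArg some ?_
          push_cast
          ring

-- positional power sum over a little-endian digit list = foldr Horner form
theorem sum_pow_eq_foldr (rds : List Nat) :
    ((List.range rds.length).map (fun k => rds.getD k 0 * 2048 ^ k)).sum
      = rds.foldr (fun d r => d + 2048 * r) 0 := by
  induction rds with
  | nil => simp
  | cons d t ih =>
    have hmap : List.map ((fun k => (d :: t).getD k 0 * 2048 ^ k) ∘ Nat.succ) (List.range t.length)
        = List.map (fun k => 2048 * (t.getD k 0 * 2048 ^ k)) (List.range t.length) := by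
      apply List.map_congr_left
      intro k _
      simp [List.getD, pow_succ]
      ring
    rw [List.length_cons, List.range_succ_eq_map, List.map_cons, List.map_map, List.sum_cons,
      hmap, List.sum_map_mul_left, List.foldr_cons, ← ih]
    simp [List.getD]

-- A's whole body = Horner foldl over the original word order (Nat-valued), no precondition needed
theorem wordsToHex_eval (wordsKey wordsList : List String) :
    wordsToHex wordsKey wordsList
      = natToHexStr (wordsKey.foldl (fun h w => h * 2048 + (PySem.List.index? wordsList w).getD 0) 0) := by
  unfold wordsToHex
  rw [PySem.List.foldl_append_singleton_eq_map]
  simp only [List.nil_append]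
  rw [PySem.List.pyRange_one]
  simp only [List.foldl_map, zero_add, Int.toNat_natCast, PySem.List.pyGetD_natCast]
  rw [PySem.List.foldl_add_nat, zero_add]
  simp only [Int.sub_zero, Int.toNat_natCast]
  rw [sum_pow_eq_foldr, List.foldr_reverse, List.foldl_map]
  congr 1
  apply PySem.List.foldl_congr_mem
  intro acc x _
  ring

-- an Int Horner fold whose digit function agrees with a Nat one casts to the Nat fold
theorem foldl_horner_cast (l : List String) (f : String → Nat) (g : String → Int)
    (h : ∀ w ∈ l, g w = (f w : Int)) (n : Nat) :
    l.foldl (fun k w => k * 2048 + g w) (n : Int)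
      = ((l.foldl (fun k w => k * 2048 + f w) n : Nat) : Int) := by
  induction l generalizing n with
  | nil => rfl
  | cons x t ih =>
    simp only [List.foldl_cons]
    rw [h x (List.mem_cons_self), show ((n : Int) * 2048 + (f x : Int)) = ((n * 2048 + f x : Nat) : Int) by push_cast; ring]
    exact ih (fun w hw => h w (List.mem_cons_of_mem _ hw)) _

-- ===== VERDICT (by name: the statement is the Claim_ definition above) =====
theorem wordsToHex_spec : Claim_equal_wordsToHex := by
  intro wordsKey wordsList _ hpre
  unfold Spec_wordsToHex wordsToHex_alt
  rw [wordsToHex_eval, natToHexStr_eq]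
  congr 1
  have hcond : ∀ w ∈ wordsKey,
      ((((PySem.List.enumerate wordsList).foldl (fun d p => PySem.Dict.setdefault d p.2 p.1)
          PySem.Dict.empty).get? w).getD 0 : Int)
        = (((PySem.List.index? wordsList w).getD 0 : Nat) : Int) := by
    intro w hw
    rw [get?_setdefault_enumerate]
    obtain ⟨k, hk⟩ := Option.isSome_iff_exists.mp
      ((PySem.List.index?_isSome_iff wordsList w).mpr (hpre w hw))
    rw [PySem.List.index?_eq_idxOf?] at hk
    simp [hk, PySem.Dict.get?_empty, Option.orElse]
  have hfold : wordsKey.foldl (fun h word => h * 2048 +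
        (((PySem.List.enumerate wordsList).foldl (fun d p => PySem.Dict.setdefault d p.2 p.1)
          PySem.Dict.empty).get? word).getD 0) (0 : Int)
      = ((wordsKey.foldl (fun h w => h * 2048 + (PySem.List.index? wordsList w).getD 0) 0 : Nat) : Int) :=
    foldl_horner_cast wordsKey _ _ hcond 0
  rw [hfold, Int.toNat_natCast]
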